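-- pv_equiv track=rewrite | github.com/ookok/LivingTreeAlAgent | livingtree/core/token_compressor.py | compress_stacktrace
-- ===== SOURCE A (Python) =====
-- def compress_stacktrace(text: str) -> str:
--     """Compress stacktrace: keep error message + first/last frames."""
--     lines = text.strip().split("\n")
--     if len(lines) <= 15:
--         return text
--
--     result = []
--     frames = []
--     in_frames = False
--     error_line = ""
--
--     for line in lines:
--         if not in_frames and ("Traceback" in line or "Error:" in line or "Exception:" in line or "panic:" in line):
--             error_line = line
--             in_frames = True
--             result.append(line)
--             continue
--         if in_frames:
--             if line.strip().startswith("File ") or line.strip().startswith("at ") or line.strip().startswith("  "):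
--                 frames.append(line)
--             else:
--                 result.append(line)
--
--     if frames:
--         result.append(frames[0])
--         if len(frames) > 4:
--             result.append(f"  ... {len(frames) - 4} intermediate frames ...")
--             result.append(frames[-3])
--             result.append(frames[-2])
--             result.append(frames[-1])
--         else:
--             result.extend(frames[1:])
--
--     return "\n".join(result)
-- ===== SOURCE B (Python) =====
-- def _is_marker(line):
--     return ("Traceback" in line or "Error:" in line
--             or "Exception:" in line or "panic:" in line)
--
--
-- def _is_frame(line):
--     s = line.strip()
--     return s.startswith("File ") or s.startswith("at ") or s.startswith("  ")
--
--
-- def compress_stacktrace(text: str) -> str: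
--     """Compress stacktrace: keep error message + first/last frames."""
--     lines = text.strip().split("\n")
--     if len(lines) <= 15:
--         return text
--
--     rest = lines
--     while rest and not _is_marker(rest[0]):
--         rest = rest[1:]
--     if not rest:
--         return ""
--
--     error_line, tail = rest[0], rest[1:]
--     frames = [l for l in tail if _is_frame(l)]
--     parts = [error_line] + [l for l in tail if not _is_frame(l)]
--
--     if frames:
--         parts.append(frames[0])
--         if len(frames) > 4:
--             parts.append(f"  ... {len(frames) - 4} intermediate frames ...")
--             parts.extend(frames[-3:])
--         else:
--             parts.extend(frames[1:])
--
--     return "\n".join(parts)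
-- ===== Notes on version B (the rewrite author's own statement) =====
-- stated objective: simpler
-- what changed: A's single-pass state machine (in_frames flag with interleaved appends to result/frames) is replaced by: drop lines up to the first marker line, then two filters over the tail for non-frames and frames, plus frames[-3:] slicing instead of three separate negative indexings.
import Mathlib
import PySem

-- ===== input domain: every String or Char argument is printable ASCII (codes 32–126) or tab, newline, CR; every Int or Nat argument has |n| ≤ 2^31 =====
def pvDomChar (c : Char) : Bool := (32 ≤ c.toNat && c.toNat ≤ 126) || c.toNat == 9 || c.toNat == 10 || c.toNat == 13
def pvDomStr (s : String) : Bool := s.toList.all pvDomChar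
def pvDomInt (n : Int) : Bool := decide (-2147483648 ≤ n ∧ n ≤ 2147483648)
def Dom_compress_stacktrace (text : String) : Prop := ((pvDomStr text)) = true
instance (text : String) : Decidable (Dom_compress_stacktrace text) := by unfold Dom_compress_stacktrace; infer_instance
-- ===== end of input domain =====

-- ===== PORT A =====
-- B changes the decomposition: A's one-pass state machine (in_frames flag) becomes
-- drop-to-first-marker plus two filters over the tail; objective: simpler. Exact same return value.
-- (A's dead `error_line` variable is never read after assignment; the ports carry only the live state.)

-- the marker test of A's first branch (identical text in both Pythons)
def pvMarker (line : String) : Bool :=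
  PySem.Str.isIn "Traceback" line || PySem.Str.isIn "Error:" line ||
    PySem.Str.isIn "Exception:" line || PySem.Str.isIn "panic:" line

-- the frame test of A's inner branch (identical text in both Pythons)
def pvFrame (line : String) : Bool :=
  PySem.Str.startswith (PySem.Str.strip line) "File " ||
    PySem.Str.startswith (PySem.Str.strip line) "at " ||
    PySem.Str.startswith (PySem.Str.strip line) "  "

-- one iteration of A's for-loop; state = (result, frames, in_frames)
def pvStepA (st : List String × List String × Bool) (line : String) :
    List String × List String × Bool :=
  let (result, frames, in_frames) := st
  if !in_frames && pvMarker line then (result ++ [line], frames, true)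
  else if in_frames then
    if pvFrame line then (result, frames ++ [line], in_frames)
    else (result ++ [line], frames, in_frames)
  else (result, frames, in_frames)

def compress_stacktrace (text : String) : String :=
  -- "\n" ≠ "" so split? is always some; getD is exact
  let lines := (PySem.Str.split? (PySem.Str.strip text) "\n").getD []
  if lines.length ≤ 15 then text
  else
    let st := lines.foldl pvStepA ([], [], false)
    let result := st.1
    let frames := st.2.1
    let result :=
      if frames.isEmpty then result
      else
        let result := result ++ [PySem.List.pyGetD frames 0 ""]
        if 4 < frames.length then
          result ++ ["  ... " ++ PySem.Int.toStr ((frames.length : Int) - 4) ++ " intermediate frames ...",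
                     PySem.List.pyGetD frames (-3) "", PySem.List.pyGetD frames (-2) "",
                     PySem.List.pyGetD frames (-1) ""]
        else
          result ++ PySem.List.slice frames (some 1) none
    PySem.Str.join "\n" result

-- ===== PORT B =====
-- B's trailing summary block (frames[0], marker line + frames[-3:], or frames[1:])
def pvSummary (frames : List String) : List String :=
  if frames.isEmpty then []
  else
    frames.headD "" ::
      (if 4 < frames.length then
        ("  ... " ++ PySem.Int.toStr ((frames.length : Int) - 4) ++ " intermediate frames ...") ::
          PySem.List.slice frames (some (-3)) none
      else PySem.List.slice frames (some 1) none)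

def compress_stacktrace_alt (text : String) : String :=
  let lines := (PySem.Str.split? (PySem.Str.strip text) "\n").getD []
  if lines.length ≤ 15 then text
  else
    -- while rest and not _is_marker(rest[0]): rest = rest[1:]
    match lines.dropWhile (fun l => !pvMarker l) with
    | [] => ""
    | error_line :: tail =>
      let frames := tail.filter pvFrame
      let parts := error_line :: tail.filter (fun l => !pvFrame l)
      PySem.Str.join "\n" (parts ++ pvSummary frames)

-- ===== PRECONDITION & SPEC =====
def Spec_compress_stacktrace (text : String) (out : String) : Prop := out = compress_stacktrace_alt text
instance (text : String) (out : String) : Decidable (Spec_compress_stacktrace text out) := by unfold Spec_compress_stacktrace; infer_instance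

-- ===== CLAIM (what is proved, stated in full; the proofs are below) =====
def Claim_equal_compress_stacktrace : Prop := ∀ (text : String), Dom_compress_stacktrace text → Spec_compress_stacktrace text (compress_stacktrace text)

-- ===== LEMMAS AND PROOFS =====

-- before the first marker, A's loop leaves its state unchanged
theorem pvFoldA_dropWhile (lines : List String) (r f : List String) :
    lines.foldl pvStepA (r, f, false) =
      (lines.dropWhile (fun l => !pvMarker l)).foldl pvStepA (r, f, false) := by
  induction lines with
  | nil => rfl
  | cons a t ih =>
    by_cases h : pvMarker a = true
    · simp [h]
    · have hb : pvMarker a = false := by simpa using h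
      simp [hb, List.foldl_cons, pvStepA, ih]

-- after the marker, A's loop partitions the tail into non-frames and frames
theorem pvFoldA_inFrames (tail : List String) (r f : List String) :
    tail.foldl pvStepA (r, f, true) =
      (r ++ tail.filter (fun l => !pvFrame l), f ++ tail.filter pvFrame, true) := by
  induction tail generalizing r f with
  | nil => simp
  | cons a t ih =>
    by_cases h : pvFrame a = true
    · simp [List.foldl_cons, pvStepA, h, ih]
    · have hb : pvFrame a = false := by simpa using h
      simp [List.foldl_cons, pvStepA, hb, ih]

theorem pvGetD_zero (l : List String) (h : l ≠ []) :
    PySem.List.pyGetD l 0 "" = l.headD "" := by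
  cases l with
  | nil => simp at h
  | cons a t => simp [PySem.List.pyGetD, PySem.List.pyGet?, PySem.List.pyIdx?]

theorem pvSlice_last3 (l : List String) (h : 4 < l.length) :
    PySem.List.slice l (some (-3)) none =
      [PySem.List.pyGetD l (-3) "", PySem.List.pyGetD l (-2) "", PySem.List.pyGetD l (-1) ""] := by
  obtain ⟨c, l', rfl⟩ : ∃ c l', l = l' ++ [c] :=
    ⟨l.getLast (by intro hn; simp [hn] at h), l.dropLast, (List.dropLast_append_getLast _).symm⟩
  obtain ⟨b, l'', rfl⟩ : ∃ b l'', l' = l'' ++ [b] :=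
    ⟨l'.getLast (by intro hn; simp [hn] at h), l'.dropLast, (List.dropLast_append_getLast _).symm⟩
  obtain ⟨a, t, rfl⟩ : ∃ a t, l'' = t ++ [a] :=
    ⟨l''.getLast (by intro hn; simp [hn] at h), l''.dropLast, (List.dropLast_append_getLast _).symm⟩
  simp only [List.append_assoc, List.singleton_append]
  simp [PySem.List.slice, PySem.List.clampIdx, PySem.List.pyGetD, PySem.List.pyGet?,
    PySem.List.pyIdx?]
  split <;> omega

-- pvStepA on the first marker line: record it, switch to in_frames
theorem pvStepA_marker (r f : List String) (err : String) (hm : pvMarker err = true) :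
    pvStepA (r, f, false) err = (r ++ [err], f, true) := by
  simp [pvStepA, hm]

set_option maxHeartbeats 1000000 in
theorem compress_stacktrace_spec : Claim_equal_compress_stacktrace := by
  unfold Claim_equal_compress_stacktrace Spec_compress_stacktrace
  intro text _
  unfold compress_stacktrace compress_stacktrace_alt
  generalize (PySem.Str.split? (PySem.Str.strip text) "\n").getD [] = lines
  by_cases hlen : lines.length ≤ 15
  · simp only [if_pos hlen]
  · simp only [if_neg hlen]
    rcases hdw : lines.dropWhile (fun l => !pvMarker l) with _ | ⟨err, tail⟩
    · have hfold := pvFoldA_dropWhile lines [] []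
      rw [hdw] at hfold
      simp only [List.foldl_nil] at hfold
      rw [hfold]
      decide
    · have hm : pvMarker err = true := by
        have := List.head_dropWhile_not (p := fun l => !pvMarker l) (l := lines) (by simp [hdw])
        simpa [hdw] using this
      have hfold : lines.foldl pvStepA ([], [], false) =
          (err :: tail.filter (fun l => !pvFrame l), tail.filter pvFrame, true) := by
        rw [pvFoldA_dropWhile, hdw, List.foldl_cons, pvStepA_marker _ _ _ hm,
          pvFoldA_inFrames]
        simp
      rw [hfold]
      simp only [pvSummary]
      by_cases hf : (tail.filter pvFrame).isEmpty
      · simp [hf]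
      · have hne : tail.filter pvFrame ≠ [] := by simpa [List.isEmpty_iff] using hf
        simp only [hf, Bool.false_eq_true, if_false]
        rw [pvGetD_zero _ hne]
        by_cases h4 : 4 < (tail.filter pvFrame).length
        · rw [pvSlice_last3 _ h4]
          simp [h4]
        · simp [h4]
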